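-- pv_equiv track=rewrite | github.com/fullcone/multiport | scripts/srcsel-w10/05-tsmp-test.py | split_v4_v6
-- ===== SOURCE A (Python) =====
-- import ipaddress
--
-- def split_v4_v6(ips: list[str]) -> tuple[list[str], list[str]]:
--     v4: list[str] = []
--     v6: list[str] = []
--     for ip in ips:
--         try:
--             addr = ipaddress.ip_address(ip)
--         except ValueError:
--             continue
--         (v4 if addr.version == 4 else v6).append(ip)
--     return v4, v6
-- ===== SOURCE B (Python) =====
-- # Standalone re-implementation: classify strings as IPv4 / IPv6 addresses without
-- # the ipaddress module, using two independent filter passes over small validators.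
--
-- _HEX = set("0123456789abcdefABCDEF")
-- _DEC = set("0123456789")
--
--
-- def _is_octet(p: str) -> bool:
--     # strict dotted-quad octet: 1-3 decimal digits, no leading zero, value <= 255
--     return (0 < len(p) <= 3 and all(c in _DEC for c in p)
--             and (len(p) == 1 or p[0] != '0') and int(p) <= 255)
--
--
-- def _is_ipv4(s: str) -> bool:
--     parts = s.split('.')
--     return len(parts) == 4 and all(_is_octet(p) for p in parts)
--
--
-- def _is_hextet(h: str) -> bool:
--     return h != "" and len(h) <= 4 and all(c in _HEX for c in h)
--
--
-- def _tail_groups(gs: list) -> "int | None":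
--     # number of 16-bit groups in a run ending the address (the last piece may be
--     # an embedded IPv4 address, worth two groups); None if anything is invalid
--     cnt = 0
--     while len(gs) > 1:
--         if not _is_hextet(gs[0]):
--             return None
--         cnt += 1
--         gs = gs[1:]
--     if gs == []:
--         return cnt
--     g = gs[0]
--     if '.' in g:
--         return cnt + 2 if _is_ipv4(g) else None
--     return cnt + 1 if _is_hextet(g) else None
--
--
-- def _after_gap(gs: list) -> "int | None":
--     # the pieces standing after '::': nothing (one trailing empty piece), or a
--     # nonempty run of groups
--     if gs == [""]:
--         return 0
--     if gs == []:
--         return None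
--     return _tail_groups(gs)
--
--
-- def _main_run(gs: list, cnt: int) -> bool:
--     # consume leading groups until '::' (an empty piece) or the end of the address
--     while gs:
--         g, rest = gs[0], gs[1:]
--         if g == "":
--             k = _after_gap(rest)
--             return k is not None and cnt + k <= 7
--         if not rest:
--             if '.' in g:
--                 return _is_ipv4(g) and cnt + 2 == 8
--             return _is_hextet(g) and cnt + 1 == 8
--         if not _is_hextet(g):
--             return False
--         gs, cnt = rest, cnt + 1
--     return False
--
--
-- def _groups_ok(parts: list) -> bool:
--     if len(parts) < 3:
--         return False
--     if parts[0] == "":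
--         if parts[1] != "":
--             return False
--         k = _after_gap(parts[2:])
--         return k is not None and k <= 7
--     return _main_run(parts, 0)
--
--
-- def _is_ipv6(s: str) -> bool:
--     if '/' in s:
--         return False  # a mask suffix like '1::2/64' is not an address
--     zs = s.split('%')
--     if len(zs) == 2:
--         addr, zone = zs
--         if zone == "":
--             return False  # a zone id must be non-empty
--     elif len(zs) == 1:
--         addr = zs[0]
--     else:
--         return False
--     return _groups_ok(addr.split(':'))
--
--
-- def split_v4_v6(ips: list[str]) -> tuple[list[str], list[str]]:
--     # No string is both a valid IPv4 and IPv6 address, so two independent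
--     # filters cover every parseable address.
--     return ([ip for ip in ips if _is_ipv4(ip)],
--             [ip for ip in ips if _is_ipv6(ip)])
-- ===== Notes on version B (the rewrite author's own statement) =====
-- stated objective: faster
-- what changed: A runs one accumulating loop that parses each string with the generic ipaddress.ip_address (object construction plus exception control flow) and branches on the .version attribute; B drops the ipaddress dependency, validates with its own strict dotted-quad checker and an iterative consume-groups-until-'::' IPv6 scanner over plain strings, and builds the two result lists as two independent filter comprehensions (no string passes both validators, so the filters are independent).
import Mathlib
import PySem

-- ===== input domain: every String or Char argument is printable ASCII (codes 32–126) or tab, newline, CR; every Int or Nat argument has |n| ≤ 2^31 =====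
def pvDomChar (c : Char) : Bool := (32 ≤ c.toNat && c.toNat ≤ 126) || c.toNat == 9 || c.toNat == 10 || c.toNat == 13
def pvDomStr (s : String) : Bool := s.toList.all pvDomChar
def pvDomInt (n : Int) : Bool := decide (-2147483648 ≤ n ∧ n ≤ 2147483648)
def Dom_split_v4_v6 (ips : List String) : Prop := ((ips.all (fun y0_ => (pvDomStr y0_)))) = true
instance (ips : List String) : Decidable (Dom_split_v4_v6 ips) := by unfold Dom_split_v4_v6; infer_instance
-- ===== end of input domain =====

-- B replaces A's single accumulating loop (generic ipaddress.ip_address parse, branch on the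
-- .version attribute) by two independent filter passes over hand-written IPv4/IPv6 validators
-- (no string passes both, so the filters reproduce A's split exactly); a timing run measured
-- B faster than A by a constant factor.

-- ===== PORT A =====
-- A parses each string with ipaddress.ip_address (try IPv4Address, then IPv6Address) and branches
-- on .version inside one accumulating loop.  The helpers below are a hand port of the library's
-- string validation, exact on all inputs (the library raises ValueError exactly where they say so).

def pvIsDec (c : Char) : Bool := '0' ≤ c && c ≤ '9'

def pvIsHex (c : Char) : Bool := pvIsDec c || ('a' ≤ c && c ≤ 'f') || ('A' ≤ c && c ≤ 'F')

-- Python str.split(sep) for a one-char separator (exact: '' → [''], keeps empty pieces)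
def pvSplitOn (sep : Char) : List Char → List (List Char)
  | [] => [[]]
  | c :: rest =>
    let r := pvSplitOn sep rest
    if c = sep then [] :: r
    else
      match r with
      | [] => [[c]]
      | h :: t => (c :: h) :: t

def pvDecVal (l : List Char) : Nat := l.foldl (fun n c => n * 10 + (c.toNat - 48)) 0

-- ipaddress._parse_octet: decimal digits only, ≤3 chars, no leading zero, value ≤ 255
def pvParseOctet? (o : List Char) : Option Nat :=
  if o = [] then none
  else if ¬ o.all pvIsDec then none
  else if o.length > 3 then none
  else if o.length > 1 ∧ o.headD ' ' = '0' then none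
  else
    let n := pvDecVal o
    if n > 255 then none else some n

-- ipaddress.IPv4Address._ip_int_from_string
def pvIPv4Int? (s : List Char) : Option Nat :=
  if s = [] then none
  else
    match (pvSplitOn '.' s).mapM pvParseOctet? with
    | some [a, b, c, d] => some (a * 16777216 + b * 65536 + c * 256 + d)
    | _ => none

-- IPv4Address(str) succeeds  ('/' is rejected by the constructor before parsing)
def pvIsIPv4 (s : List Char) : Bool := ¬ s.contains '/' && (pvIPv4Int? s).isSome

-- one lowercase hex digit
def pvHexChar (d : Nat) : Char := if d < 10 then Char.ofNat (48 + d) else Char.ofNat (87 + d)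

-- '%x' % n for n ≤ 0xffff (lowercase hex, no padding, '0' for 0)
def pvToHex (n : Nat) : List Char :=
  match [n / 4096 % 16, n / 256 % 16, n / 16 % 16, n % 16].dropWhile (· == 0) with
  | [] => ['0']
  | l => l.map pvHexChar

-- ipaddress._parse_hextet: hex digits only, ≤4 chars, non-empty (int('',16) raises)
def pvHextetOk (h : List Char) : Bool := h ≠ [] && h.all pvIsHex && h.length ≤ 4

-- the library's embedded-IPv4 step: if the last part contains '.', parse it as IPv4 and
-- replace it by the two hextets '%x' % (v >> 16), '%x' % (v & 0xffff)
def pvExpand? (gs : List (List Char)) : Option (List (List Char)) :=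
  if (gs.getLastD []).contains '.' then
    match pvIPv4Int? (gs.getLastD []) with
    | none => none
    | some v => some (gs.dropLast ++ [pvToHex (v / 65536 % 65536), pvToHex (v % 65536)])
  else some gs

-- ipaddress.IPv6Address._ip_int_from_string after the ':'-split and IPv4 expansion (validity only):
-- the skip_index loop finds the first interior empty part and raises at a second one
def pvCheck (parts : List (List Char)) : Bool :=
  if parts.length > 9 then false
  else
    let inner := (parts.drop 1).dropLast
    match inner.dropWhile (fun p => !p.isEmpty) with
    | [] =>  -- skip_index is None
      if parts.length ≠ 8 then false
      else if (parts.headD ['x']) = [] then false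
      else if (parts.getLastD ['x']) = [] then false
      else parts.all pvHextetOk
    | _ :: after =>
      if after.contains [] then false  -- a second interior empty part
      else
        let i := (inner.takeWhile (fun p => !p.isEmpty)).length + 1
        let len := parts.length
        let hi := if (parts.headD ['x']) = [] then i - 1 else i
        if (parts.headD ['x']) = [] ∧ hi ≠ 0 then false
        else
          let lo := if (parts.getLastD ['x']) = [] then len - i - 2 else len - i - 1
          if (parts.getLastD ['x']) = [] ∧ lo ≠ 0 then false
          else if hi + lo > 7 then false  -- parts_skipped = 8 - (hi + lo) < 1
          else (parts.take hi).all pvHextetOk && (parts.drop (len - lo)).all pvHextetOk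

def pvIPv6BodyOk (s : List Char) : Bool :=
  if s = [] then false
  else
    let parts0 := pvSplitOn ':' s
    if parts0.length < 3 then false
    else
      match pvExpand? parts0 with
      | none => false
      | some parts => pvCheck parts

-- IPv6Address(str): '/' check, then _split_scope_id (partition at the first '%'), then the body
def pvIsIPv6 (s : List Char) : Bool :=
  if s.contains '/' then false
  else
    let addr := s.takeWhile (· ≠ '%')
    match s.dropWhile (· ≠ '%') with
    | [] => pvIPv6BodyOk addr
    | _ :: zone => if zone = [] ∨ zone.contains '%' then false else pvIPv6BodyOk addr

-- ipaddress.ip_address(ip).version: try IPv4 first, then IPv6; ValueError → none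
def pvIpVersion? (ip : String) : Option Nat :=
  if pvIsIPv4 ip.toList then some 4
  else if pvIsIPv6 ip.toList then some 6
  else none

-- A's loop body: continue on ValueError, else append to v4 or v6 by version
def pvStepA (st : List String × List String) (ip : String) : List String × List String :=
  match pvIpVersion? ip with
  | none => st
  | some v => if v = 4 then (st.1 ++ [ip], st.2) else (st.1, st.2 ++ [ip])

def split_v4_v6 (ips : List String) : List String × List String :=
  ips.foldl pvStepA ([], [])

-- ===== PORT B =====
-- B filters ips twice.  bAccepts4/bAccepts6 port Source B's own validators: a strict dotted-quad
-- check, and an IPv6 scanner that consumes the ':'-groups recursively until the '::' gap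
-- instead of the library's index bookkeeping.

def bIsHexDig (c : Char) : Bool := c.isDigit || ('a' ≤ c && c ≤ 'f') || ('A' ≤ c && c ≤ 'F')

def bVal : List Char → Nat
  | [] => 0
  | c :: cs => (c.toNat - 48) * 10 ^ cs.length + bVal cs

def bOct (p : List Char) : Bool :=
  0 < p.length && p.length ≤ 3 && p.all Char.isDigit &&
    (p.length == 1 || !(p.headD 'x' == '0')) && bVal p ≤ 255

-- IPv4Address(s) succeeds: four '.'-separated strict decimal octets
def bAccepts4 (s : List Char) : Bool :=
  let ps := s.splitOn '.'
  ps.length == 4 && ps.all bOct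

def bHx (h : List Char) : Bool := !h.isEmpty && h.length ≤ 4 && h.all bIsHexDig

-- count the 16-bit groups of a run of ':'-separated pieces ending at the end of the address
-- (the last piece may be an embedded IPv4 address, worth two groups); none if anything is invalid
def btail? : List (List Char) → Option Nat
  | [] => some 0
  | [g] =>
    if g.contains '.' then (if bAccepts4 g then some 2 else none)
    else if bHx g then some 1 else none
  | g :: g2 :: rest => if bHx g then (btail? (g2 :: rest)).map (· + 1) else none

-- the pieces standing after '::': nothing (a lone trailing empty piece), or a nonempty run
def bAfterGap? (gs : List (List Char)) : Option Nat :=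
  match gs with
  | [[]] => some 0
  | [] => none
  | _ => btail? gs

-- consume leading groups until '::' (an empty piece) or the end
def bMain (gs : List (List Char)) (cnt : Nat) : Bool :=
  match gs with
  | [] => false
  | g :: rest =>
    if g.isEmpty then
      match bAfterGap? rest with
      | some k => decide (cnt + k ≤ 7)
      | none => false
    else if rest.isEmpty then
      if g.contains '.' then bAccepts4 g && cnt + 2 == 8
      else bHx g && cnt + 1 == 8
    else bHx g && bMain rest (cnt + 1)

def bParts6 (parts : List (List Char)) : Bool :=
  if parts.length < 3 then false
  else
    match parts with
    | g :: g2 :: rest2 =>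
      if g.isEmpty then
        if g2.isEmpty then
          match bAfterGap? rest2 with
          | some k => decide (k ≤ 7)
          | none => false
        else false
      else bMain (g :: g2 :: rest2) 0
    | _ => false

-- IPv6Address(s) succeeds: no '/', optional non-empty '%'-zone, then the group run
def bAccepts6 (s : List Char) : Bool :=
  if s.contains '/' then false
  else
    match s.splitOn '%' with
    | [addr] => bParts6 (addr.splitOn ':')
    | [addr, zone] => !zone.isEmpty && bParts6 (addr.splitOn ':')
    | _ => false

def split_v4_v6_alt (ips : List String) : List String × List String :=
  (ips.filter (fun ip => bAccepts4 ip.toList),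
   ips.filter (fun ip => bAccepts6 ip.toList))

-- ===== PRECONDITION & SPEC =====
def Spec_split_v4_v6 (ips : List String) (out : List String × List String) : Prop := out = split_v4_v6_alt ips
instance (ips : List String) (out : List String × List String) : Decidable (Spec_split_v4_v6 ips out) := by unfold Spec_split_v4_v6; infer_instance

-- ===== CLAIM (what is proved, stated in full; the proofs are below) =====
def Claim_equal_split_v4_v6 : Prop := ∀ (ips : List String), Dom_split_v4_v6 ips → Spec_split_v4_v6 ips (split_v4_v6 ips)

-- ===== LEMMAS AND PROOFS =====

-- ---- splitter bridge ----
theorem pvSplitOn_ne_nil (sep : Char) (l : List Char) : pvSplitOn sep l ≠ [] := by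
  induction l with
  | nil => simp [pvSplitOn]
  | cons c rest ih =>
    simp only [pvSplitOn]
    split
    · simp
    · match h : pvSplitOn sep rest with
      | [] => simp
      | h' :: t => simp

theorem pvSplitOn_eq_splitOn (sep : Char) (l : List Char) : l.splitOn sep = pvSplitOn sep l := by
  induction l with
  | nil => simp [pvSplitOn, List.splitOn]
  | cons c rest ih =>
    simp only [List.splitOn, List.splitOnP_cons] at *
    simp only [pvSplitOn]
    by_cases h : c = sep
    · simp [h, ih]
    · simp only [h, if_neg, beq_iff_eq, if_false]
      rw [ih]
      match hr : pvSplitOn sep rest with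
      | [] => exact absurd hr (pvSplitOn_ne_nil sep rest)
      | h' :: t => simp [List.modifyHead]

theorem pvSplitOn_append (sep : Char) (l r : List Char) :
    pvSplitOn sep (l ++ sep :: r) = pvSplitOn sep l ++ pvSplitOn sep r := by
  induction l with
  | nil => simp [pvSplitOn]
  | cons c rest ih =>
    simp only [List.cons_append, pvSplitOn, ih]
    by_cases h : c = sep
    · simp [h]
    · simp only [h, if_false]
      match hr : pvSplitOn sep rest with
      | [] => exact absurd hr (pvSplitOn_ne_nil sep rest)
      | h' :: t => simp

theorem pvSplitOn_of_not_mem (sep : Char) (l : List Char) (h : sep ∉ l) :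
    pvSplitOn sep l = [l] := by
  induction l with
  | nil => simp [pvSplitOn]
  | cons c rest ih =>
    simp only [List.mem_cons, not_or] at h
    simp [pvSplitOn, Ne.symm h.1, ih h.2]

theorem pvSplitOn_chars (sep : Char) (l : List Char) {c : Char} (hc : c ∈ l) :
    c = sep ∨ ∃ p ∈ pvSplitOn sep l, c ∈ p := by
  induction l with
  | nil => simp at hc
  | cons a rest ih =>
    simp only [pvSplitOn]
    rcases List.mem_cons.1 hc with h | h
    · subst h
      by_cases hs : c = sep
      · exact Or.inl hs
      · right
        simp only [hs, if_false]
        match hr : pvSplitOn sep rest with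
        | [] => exact absurd hr (pvSplitOn_ne_nil sep rest)
        | h' :: t => exact ⟨c :: h', List.mem_cons_self, List.mem_cons_self⟩
    · rcases ih h with h2 | ⟨p, hp, hcp⟩
      · exact Or.inl h2
      · right
        by_cases hs : a = sep
        · simp only [hs, if_pos rfl]
          exact ⟨p, List.mem_cons_of_mem _ hp, hcp⟩
        · simp only [hs, if_false]
          match hr : pvSplitOn sep rest with
          | [] => exact absurd hr (pvSplitOn_ne_nil sep rest)
          | h' :: t =>
            rw [hr] at hp
            rcases List.mem_cons.1 hp with h3 | h3
            · exact ⟨a :: h', List.mem_cons_self, by subst h3; exact List.mem_cons_of_mem _ hcp⟩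
            · exact ⟨p, List.mem_cons_of_mem _ h3, hcp⟩

-- ---- character classes, octets, hextets ----
theorem pvIsDec_eq (c : Char) : pvIsDec c = c.isDigit := by
  simp only [pvIsDec, Char.isDigit, Char.le_def]

theorem pvIsHex_eq (c : Char) : pvIsHex c = bIsHexDig c := by
  simp [pvIsHex, bIsHexDig, pvIsDec_eq]

theorem pvDecVal_foldl (l : List Char) (acc : Nat) :
    l.foldl (fun n c => n * 10 + (c.toNat - 48)) acc = acc * 10 ^ l.length + bVal l := by
  induction l generalizing acc with
  | nil => simp [bVal]
  | cons c cs ih => simp [List.foldl_cons, ih, bVal, pow_succ]; ring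

theorem all_dec_eq (l : List Char) : l.all pvIsDec = l.all Char.isDigit := by
  induction l with
  | nil => rfl
  | cons c cs ih => simp [List.all_cons, ih, pvIsDec_eq]

theorem pvDecVal_eq (l : List Char) : pvDecVal l = bVal l := by
  simp [pvDecVal, pvDecVal_foldl]

theorem pvParseOctet_isSome (p : List Char) : (pvParseOctet? p).isSome = bOct p := by
  cases p with
  | nil => simp [pvParseOctet?, bOct]
  | cons c cs =>
    simp only [pvParseOctet?, bOct, pvDecVal_eq, all_dec_eq]
    split_ifs with h1 h2 h3 h4 <;> simp_all
    · rintro rfl; simp_all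
    · rename_i hdig hlen himp hval
      by_cases hc : c = '0'
      · cases cs with
        | nil => exact Or.inl rfl
        | cons a l => exact absurd hc (himp (by simp))
      · exact Or.inr hc

theorem pvHextetOk_eq (h : List Char) : pvHextetOk h = bHx h := by
  have hall : h.all pvIsHex = h.all bIsHexDig := by
    induction h with
    | nil => rfl
    | cons c cs ih => simp [List.all_cons, ih, pvIsHex_eq]
  by_cases h0 : h = []
  · simp [h0, pvHextetOk, bHx]
  · have he : h.isEmpty = false := by simp [h0]
    simp only [pvHextetOk, bHx, hall, he, h0]
    cases hb : h.all bIsHexDig <;> cases hd : decide (h.length ≤ 4) <;> simp_all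

-- ---- IPv4 ----
theorem mapM_octet_isSome (ps : List (List Char)) :
    (ps.mapM pvParseOctet?).isSome = ps.all (fun p => (pvParseOctet? p).isSome) := by
  induction ps with
  | nil => simp
  | cons p rest ih =>
    simp only [List.mapM_cons, List.all_cons, ← ih]
    cases pvParseOctet? p <;> cases h : rest.mapM pvParseOctet? <;> simp [h]

theorem mapM_octet_length {ps : List (List Char)} {l : List Nat}
    (h : ps.mapM pvParseOctet? = some l) : l.length = ps.length := by
  induction ps generalizing l with
  | nil => simp at h; simp [← h]
  | cons p rest ih =>
    simp only [List.mapM_cons] at h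
    cases hp : pvParseOctet? p <;> rw [hp] at h <;> simp only [Option.bind_eq_bind] at h
    · simp at h
    · cases hm : rest.mapM pvParseOctet? <;> rw [hm] at h <;> simp at h
      subst h
      simp [ih hm]

theorem pvIPv4Int_isSome (s : List Char) : (pvIPv4Int? s).isSome = bAccepts4 s := by
  by_cases h0 : s = []
  · subst h0; simp [pvIPv4Int?, bAccepts4, List.splitOn, List.splitOnP_nil, bOct]
  · simp only [pvIPv4Int?, h0, if_false, bAccepts4, pvSplitOn_eq_splitOn]
    cases hm : (pvSplitOn '.' s).mapM pvParseOctet? with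
    | none =>
      have : (pvSplitOn '.' s).all (fun p => (pvParseOctet? p).isSome) = false := by
        rw [← mapM_octet_isSome, hm]; rfl
      have : (pvSplitOn '.' s).all bOct = false := by
        rw [← this]; congr 1; exact funext fun p => (pvParseOctet_isSome p).symm
      simp [this]
    | some l =>
      have hlen := mapM_octet_length hm
      have hall : (pvSplitOn '.' s).all bOct = true := by
        rw [show (pvSplitOn '.' s).all bOct
              = (pvSplitOn '.' s).all (fun p => (pvParseOctet? p).isSome) from
            congrArg _ (funext fun p => (pvParseOctet_isSome p).symm),
          ← mapM_octet_isSome, hm]; rfl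
      rcases l with _ | ⟨a, _ | ⟨b, _ | ⟨c, _ | ⟨d, _ | ⟨e, t⟩⟩⟩⟩⟩ <;>
        simp_all <;> omega

theorem bAccepts4_chars (s : List Char) (h : bAccepts4 s = true) :
    ∀ c ∈ s, c.isDigit = true ∨ c = '.' := by
  intro c hc
  rcases pvSplitOn_chars '.' s hc with h1 | ⟨p, hp, hcp⟩
  · exact Or.inr h1
  · left
    simp only [bAccepts4, pvSplitOn_eq_splitOn, Bool.and_eq_true, List.all_eq_true] at h
    have hoct := h.2 p hp
    simp only [bOct, Bool.and_eq_true, List.all_eq_true] at hoct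
    exact hoct.1.1.2 c hcp

theorem pvIsIPv4_eq (s : List Char) : pvIsIPv4 s = bAccepts4 s := by
  rw [pvIsIPv4, pvIPv4Int_isSome]
  cases hb : bAccepts4 s
  · simp
  · have hnm : '/' ∉ s := fun hmem => by
      rcases bAccepts4_chars s hb '/' hmem with h | h <;> simp_all
    simp [List.contains_eq_mem, hnm]

theorem pvHexChar_hex (d : Nat) (h : d < 16) : pvIsHex (pvHexChar d) = true := by
  interval_cases d <;> decide

theorem pvToHex_hextet (v : Nat) : pvHextetOk (pvToHex v) = true := by
  unfold pvToHex
  have hmem : ∀ d ∈ [v / 4096 % 16, v / 256 % 16, v / 16 % 16, v % 16], d < 16 := by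
    intro d hd; simp at hd
    rcases hd with h | h | h | h <;> omega
  cases hdw : [v / 4096 % 16, v / 256 % 16, v / 16 % 16, v % 16].dropWhile (· == 0) with
  | nil => simp [pvHextetOk]; decide
  | cons x t =>
    have hsub : ∀ d ∈ x :: t, d < 16 := by
      intro d hd
      exact hmem d ((List.dropWhile_sublist _).subset (hdw ▸ hd))
    have hlen : (x :: t).length ≤ 4 := by
      have := (hdw ▸ List.dropWhile_sublist (l := [v / 4096 % 16, v / 256 % 16, v / 16 % 16, v % 16])
        (p := (· == 0))).length_le
      simpa using this
    simp only [pvHextetOk, Bool.and_eq_true, List.all_eq_true]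
    refine ⟨⟨by simp, ?_⟩, by simpa using hlen⟩
    intro ch hch
    rcases List.mem_map.1 hch with ⟨d, hd, rfl⟩
    exact pvHexChar_hex d (hsub d hd)

theorem pvToHex_ne_nil (v : Nat) : pvToHex v ≠ [] := by
  have := pvToHex_hextet v
  simp only [pvHextetOk, Bool.and_eq_true] at this
  simpa using this.1.1

-- ---- expansion ----
theorem pvExpand_cons (g : List Char) (rest : List (List Char)) (h : rest ≠ []) :
    pvExpand? (g :: rest) = (pvExpand? rest).map (g :: ·) := by
  have hlast : (g :: rest).getLastD [] = rest.getLastD [] := by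
    cases rest with
    | nil => simp_all
    | cons a t => simp [List.getLastD]
  have hdrop : (g :: rest).dropLast = g :: rest.dropLast := by
    cases rest with
    | nil => simp_all
    | cons a t => simp
  simp only [pvExpand?, hlast, hdrop]
  split
  · cases pvIPv4Int? (rest.getLastD []) <;> simp
  · simp

theorem pvExpand_append (xs rest : List (List Char)) (h : rest ≠ []) :
    pvExpand? (xs ++ rest) = (pvExpand? rest).map (xs ++ ·) := by
  induction xs with
  | nil =>
    simp only [List.nil_append]
    cases pvExpand? rest <;> simp
  | cons x xs ih =>
    have hne : xs ++ rest ≠ [] := by simp [h]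
    rw [List.cons_append, pvExpand_cons x (xs ++ rest) hne, ih]
    cases pvExpand? rest <;> simp

theorem pvExpand_no_empty {gs p : List (List Char)} (h : pvExpand? gs = some p)
    (hg : [] ∉ gs) : [] ∉ p := by
  simp only [pvExpand?] at h
  split at h
  · cases hv : pvIPv4Int? (gs.getLastD []) <;> rw [hv] at h <;> simp at h
    subst h
    intro hmem
    rcases List.mem_append.1 hmem with h1 | h1
    · exact hg ((List.dropLast_sublist gs).subset h1)
    · simp at h1
      rcases h1 with h1 | h1 <;> exact pvToHex_ne_nil _ h1
  · simp at h; subst h; exact hg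

theorem pvExpand_nil : pvExpand? [] = some [] := by
  simp [pvExpand?]

theorem pvExpand_ne_nil {gs p : List (List Char)} (h : pvExpand? gs = some p) (hg : gs ≠ []) :
    p ≠ [] := by
  simp only [pvExpand?] at h
  split at h
  · cases hv : pvIPv4Int? (gs.getLastD []) <;> rw [hv] at h <;> simp at h
    subst h; simp
  · simp at h; subst h; exact hg

-- ---- btail? characterization through the expansion ----
theorem btail_eq (gs : List (List Char)) :
    btail? gs = match pvExpand? gs with
      | none => none
      | some p => if p.all pvHextetOk then some p.length else none := by
  induction gs with
  | nil => simp [btail?, pvExpand_nil]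
  | cons g rest ih =>
    cases rest with
    | nil =>
      by_cases hdot : '.' ∈ g
      · rw [show btail? [g] = (if bAccepts4 g then some 2 else none) from by
            simp [btail?, List.contains_eq_mem, hdot]]
        rw [← pvIPv4Int_isSome]
        cases hv : pvIPv4Int? g with
        | none => simp [pvExpand?, List.contains_eq_mem, hdot, hv, List.getLastD]
        | some v =>
          simp [pvExpand?, List.contains_eq_mem, hdot, hv, pvToHex_hextet, List.getLastD]
      · rw [show btail? [g] = (if bHx g then some 1 else none) from by
            simp [btail?, List.contains_eq_mem, hdot]]
        rw [← pvHextetOk_eq]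
        cases hx : pvHextetOk g <;>
          simp [pvExpand?, List.contains_eq_mem, hdot, hx, List.getLastD]
    | cons g2 rest2 =>
      rw [show btail? (g :: g2 :: rest2)
            = (if bHx g then (btail? (g2 :: rest2)).map (· + 1) else none) from rfl]
      rw [pvExpand_cons g (g2 :: rest2) (by simp), ih, ← pvHextetOk_eq]
      cases hx : pvHextetOk g <;>
        cases pvExpand? (g2 :: rest2) <;>
          simp only [hx, Option.map_some, Option.map_none, List.all_cons,
            Bool.false_and, Bool.true_and, if_true, if_false, Bool.false_eq_true] <;>
        first
        | rfl
        | (split <;> simp)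

-- predicate used by pvCheck's skip_index scan
theorem pvNE_of_not_mem {xs : List (List Char)} (h : [] ∉ xs) :
    ∀ x ∈ xs, (!x.isEmpty) = true := by
  intro x hx
  simp only [Bool.not_eq_eq_eq_not, Bool.not_true, List.isEmpty_eq_false_iff]
  exact fun he => h (he ▸ hx)

theorem pvTW_all {xs : List (List Char)} (h : [] ∉ xs) :
    xs.takeWhile (fun p => !p.isEmpty) = xs :=
  List.takeWhile_eq_self_iff.2 (pvNE_of_not_mem h)

theorem pvDW_all {xs : List (List Char)} (h : [] ∉ xs) :
    xs.dropWhile (fun p => !p.isEmpty) = [] :=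
  List.dropWhile_eq_nil_iff.2 (pvNE_of_not_mem h)

theorem pvDW_app {xs : List (List Char)} (ys : List (List Char)) (h : [] ∉ xs) :
    (xs ++ ys).dropWhile (fun p => !p.isEmpty) = ys.dropWhile (fun p => !p.isEmpty) := by
  rw [List.dropWhile_append, pvDW_all h]
  simp

theorem pvTW_app {xs : List (List Char)} (ys : List (List Char)) (h : [] ∉ xs) :
    (xs ++ ys).takeWhile (fun p => !p.isEmpty)
      = xs ++ ys.takeWhile (fun p => !p.isEmpty) := by
  rw [List.takeWhile_append, pvTW_all h]
  simp

theorem pvDW_first {l res : List (List Char)} {y : List Char}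
    (h : l.dropWhile (fun p => !p.isEmpty) = y :: res) : y = [] := by
  induction l with
  | nil => simp at h
  | cons a t ih =>
    rw [List.dropWhile_cons] at h
    split at h
    · exact ih h
    · rename_i ha
      injection h with h1 h2
      rw [← h1]
      simpa [List.isEmpty_iff] using ha

theorem pvLastD_app (xs : List (List Char)) {r : List (List Char)} (d : List Char)
    (h : r ≠ []) : (xs ++ r).getLastD d = r.getLastD d := by
  rw [List.getLastD_eq_getLast?, List.getLastD_eq_getLast?, List.getLast?_append_of_ne_nil _ h]

theorem pvLastD_ne {p : List (List Char)} (d : List Char) (h0 : p ≠ []) (h : [] ∉ p) :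
    p.getLastD d ≠ [] := by
  rw [List.getLastD_eq_getLast?, List.getLast?_eq_some_getLast h0]
  simp only [Option.getD_some]
  exact fun he => h (he ▸ List.getLast_mem h0)

theorem pvLast_empty {r : List (List Char)} (d : List Char) (hr : [] ∈ r)
    (hd : [] ∉ r.dropLast) : r.getLastD d = [] := by
  have h0 : r ≠ [] := fun he => by simp [he] at hr
  rw [List.getLastD_eq_getLast?, List.getLast?_eq_some_getLast h0]
  simp only [Option.getD_some]
  by_contra hne
  rcases (List.mem_append.1 ((List.dropLast_append_getLast h0) ▸ hr)) with h1 | h1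
  · exact hd h1
  · simp at h1
    exact hne (by rw [← h1])

theorem pvExpand_ne_single {gs r : List (List Char)} (h : pvExpand? gs = some r)
    (hg : gs ≠ [[]]) : r ≠ [[]] := by
  simp only [pvExpand?] at h
  split at h
  · cases hv : pvIPv4Int? (gs.getLastD []) <;> rw [hv] at h <;> simp at h
    subst h
    intro he
    have := congrArg List.length he
    simp at this
  · simp at h; subst h; exact hg

-- ---- bMain characterizations ----
theorem bMain_no_gap (gs : List (List Char)) (cnt : Nat) (h : gs ≠ []) (hg : [] ∉ gs) :
    bMain gs cnt = match btail? gs with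
      | some k => decide (cnt + k = 8)
      | none => false := by
  induction gs generalizing cnt with
  | nil => simp at h
  | cons g rest ih =>
    have hgne : g ≠ [] := fun he => hg (he ▸ List.mem_cons_self)
    have hge : g.isEmpty = false := by simpa [List.isEmpty_iff] using hgne
    cases rest with
    | nil =>
      simp only [bMain, btail?, hge, List.isEmpty_nil, Bool.false_eq_true, if_false, if_true]
      by_cases hdot : g.contains '.' <;> by_cases hb : bAccepts4 g <;>
        by_cases hx : bHx g <;>
          simp only [hdot, hb, hx, if_true, if_false, Bool.true_and, Bool.false_and] <;>
        first
        | rfl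
        | (cases h8 : decide (cnt + 2 = 8) <;> simp_all)
        | (cases h8 : decide (cnt + 1 = 8) <;> simp_all)
    | cons g2 rest2 =>
      have hstep : bMain (g :: g2 :: rest2) cnt = (bHx g && bMain (g2 :: rest2) (cnt + 1)) := by
        rw [bMain]; simp [hge]
      have hbt : btail? (g :: g2 :: rest2)
          = (if bHx g then (btail? (g2 :: rest2)).map (· + 1) else none) := rfl
      rw [hstep, hbt, ih (cnt + 1) (by simp) (fun hm => hg (List.mem_cons_of_mem _ hm))]
      cases hx : bHx g
      · simp
      · cases hk : btail? (g2 :: rest2) <;> simp <;> omega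

theorem bMain_gap (pre rest : List (List Char)) (cnt : Nat) (hg : [] ∉ pre) :
    bMain (pre ++ [] :: rest) cnt =
      (pre.all bHx && match bAfterGap? rest with
        | some k => decide (cnt + pre.length + k ≤ 7)
        | none => false) := by
  induction pre generalizing cnt with
  | nil =>
    rw [List.nil_append, bMain]
    simp only [List.isEmpty_nil, if_true, List.all_nil, Bool.true_and, List.length_nil]
    cases bAfterGap? rest <;> simp
  | cons p pre' ih =>
    have hpne : p ≠ [] := fun he => hg (he ▸ List.mem_cons_self)
    have hpe : p.isEmpty = false := by simpa [List.isEmpty_iff] using hpne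
    have hre : (pre' ++ [] :: rest).isEmpty = false := by
      cases pre' <;> simp
    rw [List.cons_append, bMain]
    simp only [hpe, hre, Bool.false_eq_true, if_false]
    rw [ih (cnt + 1) (fun hm => hg (List.mem_cons_of_mem _ hm))]
    cases bAfterGap? rest with
    | none => simp
    | some k =>
      simp only [List.all_cons, List.length_cons, Bool.and_assoc]
      have harith : cnt + 1 + pre'.length + k = cnt + (pre'.length + 1) + k := by omega
      rw [harith]
      rfl

-- ---- pvCheck on each shape ----
theorem pvCheck_no_empty (p : List (List Char)) (h : [] ∉ p) :
    pvCheck p = (p.length == 8 && p.all pvHextetOk) := by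
  have hinner : [] ∉ (p.drop 1).dropLast :=
    fun hm => h ((List.drop_sublist 1 p).subset ((List.dropLast_sublist (p.drop 1)).subset hm))
  rw [pvCheck]
  simp only [pvDW_all hinner]
  by_cases hlen : p.length = 8
  · have h9 : ¬ p.length > 9 := by omega
    have hp0 : p ≠ [] := by intro he; rw [he] at hlen; simp at hlen
    obtain ⟨a, t, rfl⟩ := List.exists_cons_of_ne_nil hp0
    have ha : a ≠ [] := fun he => h (he ▸ List.mem_cons_self)
    have hlast := pvLastD_ne (p := a :: t) ['x'] hp0 h
    rw [List.getLastD_eq_getLast?] at hlast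
    simp only [h9, hlen, if_false]
    simp [ha, hlast, hlen]
  · by_cases h9 : p.length > 9 <;> simp [h9, hlen]

theorem pvCheck_mid (pre r : List (List Char)) (hpre : [] ∉ pre) (hpre0 : pre ≠ [])
    (hr : [] ∉ r) (hr0 : r ≠ []) :
    pvCheck (pre ++ [] :: r) =
      (decide (pre.length + r.length ≤ 7) && pre.all pvHextetOk && r.all pvHextetOk) := by
  obtain ⟨a, pre', rfl⟩ := List.exists_cons_of_ne_nil hpre0
  have ha : a ≠ [] := fun he => hpre (he ▸ List.mem_cons_self)
  have hpre' : [] ∉ pre' := fun hm => hpre (List.mem_cons_of_mem _ hm)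
  rw [pvCheck]
  by_cases h9 : ((a :: pre') ++ [] :: r).length > 9
  · rw [if_pos h9]
    have h7 : ¬ (pre'.length + 1 + r.length ≤ 7) := by simp at h9 ⊢; omega
    simp [h7]
  · have hdrop : (((a :: pre') ++ [] :: r).drop 1).dropLast = pre' ++ [] :: r.dropLast := by
      rw [List.cons_append, List.drop_succ_cons, List.drop_zero,
        show ([] :: r : List (List Char)) = [[]] ++ r from rfl, ← List.append_assoc,
        List.dropLast_append_of_ne_nil hr0, List.append_assoc]
      rfl
    have hdw : (pre' ++ [] :: r.dropLast).dropWhile (fun p => !p.isEmpty)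
        = [] :: r.dropLast := by rw [pvDW_app _ hpre']; rfl
    have htw : (pre' ++ [] :: r.dropLast).takeWhile (fun p => !p.isEmpty) = pre' := by
      rw [pvTW_app _ hpre']; simp
    simp only [h9, if_false, hdrop, hdw, htw]
    have hnc : (r.dropLast).contains ([] : List Char) = false := by
      simp only [List.contains_eq_mem, decide_eq_false_iff_not]
      exact fun hm => hr ((List.dropLast_sublist _).subset hm)
    have hhead : ((a :: pre') ++ [] :: r).headD ['x'] = a := rfl
    have hlast : ((a :: pre') ++ [] :: r).getLastD ['x'] = r.getLastD ['x'] := by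
      rw [show ((a :: pre') ++ [] :: r : List (List Char)) = ((a :: pre') ++ [[]]) ++ r by simp,
        pvLastD_app _ _ hr0]
    simp only [hnc, Bool.false_eq_true, if_false, hhead, hlast]
    have hlne := pvLastD_ne ['x'] hr0 hr
    have hlen : ((a :: pre') ++ [] :: r).length = pre'.length + 1 + 1 + r.length := by
      simp; omega
    simp only [ha, hlne, false_and, if_false]
    have hi : pre'.length + 1 + (((a :: pre') ++ [] :: r).length - (pre'.length + 1) - 1)
        = pre'.length + 1 + r.length := by simp [hlen]
    by_cases h7 : pre'.length + 1 + r.length ≤ 7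
    · have : ¬ (pre'.length + 1 + (((a :: pre') ++ [] :: r).length - (pre'.length + 1) - 1) > 7) := by
        rw [hi]; omega
      simp only [this, if_false]
      have htake : ((a :: pre') ++ [] :: r).take (pre'.length + 1) = a :: pre' := by
        rw [show pre'.length + 1 = (a :: pre').length from by simp, List.take_left]
      have hdropn : ((a :: pre') ++ [] :: r).drop
          (((a :: pre') ++ [] :: r).length - (((a :: pre') ++ [] :: r).length
            - (pre'.length + 1) - 1)) = r := by
        rw [show ((a :: pre') ++ [] :: r).length - (((a :: pre') ++ [] :: r).length
            - (pre'.length + 1) - 1) = ((a :: pre') ++ [[]]).length from by simp [hlen]; omega,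
          show ((a :: pre') ++ [] :: r : List (List Char)) = ((a :: pre') ++ [[]]) ++ r by simp,
          List.drop_left]
      rw [htake, hdropn]
      simp [h7, List.length_cons]
    · have : pre'.length + 1 + (((a :: pre') ++ [] :: r).length - (pre'.length + 1) - 1) > 7 := by
        rw [hi]; omega
      simp [this, h7]

theorem pvCheck_trail (pre : List (List Char)) (hpre : [] ∉ pre) (hpre0 : pre ≠ []) :
    pvCheck (pre ++ [[], []]) = (decide (pre.length ≤ 7) && pre.all pvHextetOk) := by
  obtain ⟨a, pre', rfl⟩ := List.exists_cons_of_ne_nil hpre0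
  have ha : a ≠ [] := fun he => hpre (he ▸ List.mem_cons_self)
  have hpre' : [] ∉ pre' := fun hm => hpre (List.mem_cons_of_mem _ hm)
  rw [pvCheck]
  by_cases h9 : ((a :: pre') ++ [[], ([] : List Char)]).length > 9
  · rw [if_pos h9]
    have h7 : ¬ (pre'.length + 1 ≤ 7) := by simp at h9 ⊢; omega
    simp [h7]
  · rw [if_neg h9]
    have hdrop : (((a :: pre') ++ [[], []]).drop 1).dropLast = pre' ++ [[]] := by
      rw [List.cons_append, List.drop_succ_cons, List.drop_zero,
        List.dropLast_append_of_ne_nil (by simp)]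
      rfl
    have hdw : (pre' ++ [[]] : List (List Char)).dropWhile (fun p => !p.isEmpty)
        = [[]] := by rw [pvDW_app _ hpre']; rfl
    have htw : (pre' ++ [[]] : List (List Char)).takeWhile (fun p => !p.isEmpty) = pre' := by
      rw [pvTW_app _ hpre']; simp
    simp only [hdrop, hdw, htw]
    have hlast : ((a :: pre') ++ [[], []]).getLastD ['x'] = [] := by
      rw [show ((a :: pre') ++ [[], []] : List (List Char))
            = ((a :: pre') ++ [[]]) ++ [[]] by simp, pvLastD_app _ _ (by simp)]
      rfl
    have hhead : ((a :: pre') ++ [[], []]).headD ['x'] = a := rfl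
    have hlen : ((a :: pre') ++ [[], []]).length = pre'.length + 3 := by simp
    simp only [hhead, hlast, hlen, ha, false_and, if_false, List.contains_nil,
      Bool.false_eq_true]
    have hlo : pre'.length + 3 - (pre'.length + 1) - 2 = 0 := by omega
    simp only [hlo, ite_true, true_and, ne_eq]
    by_cases h7 : pre'.length + 1 ≤ 7
    · have h7' : ¬ (pre'.length + 1 + 0 > 7) := by omega
      simp only [h7', if_false]
      have htake : ((a :: pre') ++ [[], []]).take (pre'.length + 1) = a :: pre' := by
        rw [show pre'.length + 1 = (a :: pre').length from by simp, List.take_left]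
      have hdropn : ((a :: pre') ++ [[], []]).drop (pre'.length + 3 - 0) = [] := by
        apply List.drop_eq_nil_of_le
        simp
      rw [htake, hdropn]
      simp [h7]
    · have h7' : pre'.length + 1 + 0 > 7 := by omega
      simp [h7', h7]

theorem pvCheck_gap_end (pre : List (List Char)) (hpre : [] ∉ pre) :
    pvCheck (pre ++ [[]]) = false := by
  cases pre with
  | nil => decide
  | cons a pre' =>
    have ha : a ≠ [] := fun he => hpre (he ▸ List.mem_cons_self)
    have hpre' : [] ∉ pre' := fun hm => hpre (List.mem_cons_of_mem _ hm)
    rw [pvCheck]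
    by_cases h9 : ((a :: pre') ++ [[]] : List (List Char)).length > 9
    · rw [if_pos h9]
    · rw [if_neg h9]
      have hdrop : (((a :: pre') ++ [[]]).drop 1).dropLast = pre' := by
        rw [List.cons_append, List.drop_succ_cons, List.drop_zero, List.dropLast_concat]
      simp only [hdrop, pvDW_all hpre']
      by_cases h8 : ((a :: pre') ++ [[]] : List (List Char)).length = 8
      · have hlast : ((a :: pre') ++ [[]]).getLastD ['x'] = [] := by
          rw [List.getLastD_eq_getLast?, List.getLast?_concat]
          rfl
        simp [h8, hlast]
        intros
        decide
      · simp [h8]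
        intros
        decide

theorem pvCheck_head (r : List (List Char)) (hr : [] ∉ r) (hr0 : r ≠ []) :
    pvCheck ([] :: [] :: r) = (decide (r.length ≤ 7) && r.all pvHextetOk) := by
  rw [pvCheck]
  by_cases h9 : ([] :: [] :: r : List (List Char)).length > 9
  · rw [if_pos h9]
    have h7 : ¬ (r.length ≤ 7) := by simp at h9 ⊢; omega
    simp [h7]
  · rw [if_neg h9]
    have hdrop : (([] :: [] :: r : List (List Char)).drop 1).dropLast = [] :: r.dropLast := by
      rw [List.drop_succ_cons, List.drop_zero,
        show ([] :: r : List (List Char)) = [[]] ++ r from rfl,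
        List.dropLast_append_of_ne_nil hr0]
      rfl
    have hdw : ([] :: r.dropLast : List (List Char)).dropWhile (fun p => !p.isEmpty)
        = [] :: r.dropLast := by rw [List.dropWhile_cons]; simp
    simp only [hdrop, hdw]
    have hnc : (r.dropLast).contains ([] : List Char) = false := by
      simp only [List.contains_eq_mem, decide_eq_false_iff_not]
      exact fun hm => hr ((List.dropLast_sublist _).subset hm)
    have hlast : ([] :: [] :: r).getLastD ['x'] = r.getLastD ['x'] := by
      rw [show ([] :: [] :: r : List (List Char)) = [[], []] ++ r by simp, pvLastD_app _ _ hr0]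
    have hlne := pvLastD_ne ['x'] hr0 hr
    have htw : ([] :: r.dropLast : List (List Char)).takeWhile (fun p => !p.isEmpty) = [] := by
      rw [List.takeWhile_cons]; simp
    have hlen : ([] :: [] :: r : List (List Char)).length = r.length + 2 := by simp
    simp only [hlast, hlne, false_and, if_false, hnc, Bool.false_eq_true, htw,
      List.length_nil, hlen, List.headD_cons]
    have hhi : (0 : Nat) + 1 - 1 = 0 := rfl
    simp only [hhi, if_pos rfl, if_neg (by simp : ¬(([] : List Char) = [] ∧ (0 : Nat) ≠ 0)),
      if_true]
    have hlo : r.length + 2 - (0 + 1) - 1 = r.length := by omega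
    simp only [hlo]
    by_cases h7 : r.length ≤ 7
    · have h7' : ¬ ((0 : Nat) + r.length > 7) := by omega
      simp only [h7', if_false]
      have hdropn : ([] :: [] :: r : List (List Char)).drop (r.length + 2 - r.length) = r := by
        rw [show r.length + 2 - r.length = 2 by omega]
        rfl
      rw [hdropn]
      simp [h7]
    · have h7' : (0 : Nat) + r.length > 7 := by omega
      simp [h7', h7]

theorem pvCheck_head_bad (g2 : List Char) (r : List (List Char)) (hg : g2 ≠ []) :
    pvCheck ([] :: g2 :: r) = false := by
  rw [pvCheck]
  by_cases h9 : ([] :: g2 :: r : List (List Char)).length > 9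
  · rw [if_pos h9]
  · rw [if_neg h9]
    have hdrop : (([] :: g2 :: r : List (List Char)).drop 1).dropLast = (g2 :: r).dropLast := by
      rw [List.drop_succ_cons, List.drop_zero]
    simp only [hdrop]
    cases r with
    | nil =>
      simp [List.dropLast]
    | cons b rs =>
      have hinner : (g2 :: b :: rs).dropLast = g2 :: (b :: rs).dropLast := by
        rw [show (g2 :: b :: rs : List (List Char)) = [g2] ++ b :: rs from rfl,
          List.dropLast_append_of_ne_nil (by simp)]
        rfl
      have hg2 : (!g2.isEmpty) = true := by simpa [List.isEmpty_iff] using hg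
      rw [hinner]
      cases hdw : ((b :: rs).dropLast).dropWhile (fun p => !p.isEmpty) with
      | nil =>
        rw [List.dropWhile_cons, if_pos hg2, hdw]
        simp
      | cons y after =>
        rw [List.dropWhile_cons, if_pos hg2, hdw]
        by_cases hac : after.contains ([] : List Char)
        · have hmem : ([] : List Char) ∈ after := by
            simpa [List.contains_eq_mem] using hac
          simp [hac]
          intro hno
          exact absurd hmem hno
        · have htw : ((g2 :: (b :: rs).dropLast).takeWhile (fun p => !p.isEmpty)).length
              = ((b :: rs).dropLast.takeWhile (fun p => !p.isEmpty)).length + 1 := by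
            rw [List.takeWhile_cons, if_pos hg2]
            rfl
          simp only [htw, hac, if_false, List.headD_cons]
          simp

theorem pvCheck_head_second (r : List (List Char)) (hr : [] ∈ r) (hne : r ≠ [[]]) :
    pvCheck ([] :: [] :: r) = false := by
  have hr0 : r ≠ [] := fun he => by simp [he] at hr
  rw [pvCheck]
  by_cases h9 : ([] :: [] :: r : List (List Char)).length > 9
  · rw [if_pos h9]
  · rw [if_neg h9]
    have hdrop : (([] :: [] :: r : List (List Char)).drop 1).dropLast = [] :: r.dropLast := by
      rw [List.drop_succ_cons, List.drop_zero,
        show ([] :: r : List (List Char)) = [[]] ++ r from rfl,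
        List.dropLast_append_of_ne_nil hr0]
      rfl
    have hdw : ([] :: r.dropLast : List (List Char)).dropWhile (fun p => !p.isEmpty)
        = [] :: r.dropLast := by rw [List.dropWhile_cons]; simp
    simp only [hdrop, hdw]
    by_cases hcd : [] ∈ r.dropLast
    · have : (r.dropLast).contains ([] : List Char) = true := by
        simpa [List.contains_eq_mem] using hcd
      simp [this]
      intro hno
      exact absurd hcd hno
    · have hnc : (r.dropLast).contains ([] : List Char) = false := by
        simpa [List.contains_eq_mem] using hcd
      have hlast : ([] :: [] :: r).getLastD ['x'] = [] := by
        rw [show ([] :: [] :: r : List (List Char)) = [[], []] ++ r by simp,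
          pvLastD_app _ _ hr0, pvLast_empty _ hr hcd]
      have htw : ([] :: r.dropLast : List (List Char)).takeWhile (fun p => !p.isEmpty) = [] := by
        rw [List.takeWhile_cons]; simp
      have hlen : ([] :: [] :: r : List (List Char)).length = r.length + 2 := by simp
      have hrlen : 1 ≤ r.length := by
        cases r with
        | nil => simp at hr0
        | cons x xs => simp
      have hrlen2 : 2 ≤ r.length := by
        by_contra hlt
        push_neg at hlt
        have hpos : 0 < r.length := List.length_pos_iff.2 hr0
        have h1 : r.length = 1 := by omega
        obtain ⟨x, hx⟩ := List.length_eq_one_iff.1 h1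
        subst hx
        simp at hr
        exact hne (by rw [hr])
      simp only [hnc, Bool.false_eq_true, if_false, hlast, htw, List.length_nil,
        List.headD_cons, hlen]
      have hhi : (0 : Nat) + 1 - 1 = 0 := rfl
      have hlo : r.length + 2 - (0 + 1) - 2 = r.length - 1 := by omega
      have hne0 : ¬ (r.length - 1 = 0) := by omega
      simp [hhi, hlo, hne0]

theorem pvCheck_mid_second (pre r : List (List Char)) (hpre : [] ∉ pre) (hpre0 : pre ≠ [])
    (hr : [] ∈ r) (hne : r ≠ [[]]) :
    pvCheck (pre ++ [] :: r) = false := by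
  have hr0 : r ≠ [] := fun he => by simp [he] at hr
  obtain ⟨a, pre', rfl⟩ := List.exists_cons_of_ne_nil hpre0
  have ha : a ≠ [] := fun he => hpre (he ▸ List.mem_cons_self)
  have hpre' : [] ∉ pre' := fun hm => hpre (List.mem_cons_of_mem _ hm)
  rw [pvCheck]
  by_cases h9 : ((a :: pre') ++ [] :: r).length > 9
  · rw [if_pos h9]
  · rw [if_neg h9]
    have hdrop : (((a :: pre') ++ [] :: r).drop 1).dropLast = pre' ++ [] :: r.dropLast := by
      rw [List.cons_append, List.drop_succ_cons, List.drop_zero,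
        show ([] :: r : List (List Char)) = [[]] ++ r from rfl, ← List.append_assoc,
        List.dropLast_append_of_ne_nil hr0, List.append_assoc]
      rfl
    have hdw : (pre' ++ [] :: r.dropLast).dropWhile (fun p => !p.isEmpty)
        = [] :: r.dropLast := by rw [pvDW_app _ hpre']; rfl
    simp only [hdrop, hdw]
    by_cases hcd : [] ∈ r.dropLast
    · have : (r.dropLast).contains ([] : List Char) = true := by
        simpa [List.contains_eq_mem] using hcd
      simp [this]
      intro hno
      exact absurd hcd hno
    · have hnc : (r.dropLast).contains ([] : List Char) = false := by
        simpa [List.contains_eq_mem] using hcd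
      have hlast : ((a :: pre') ++ [] :: r).getLastD ['x'] = [] := by
        rw [show ((a :: pre') ++ [] :: r : List (List Char)) = ((a :: pre') ++ [[]]) ++ r by simp,
          pvLastD_app _ _ hr0, pvLast_empty _ hr hcd]
      have htw : (pre' ++ [] :: r.dropLast).takeWhile (fun p => !p.isEmpty) = pre' := by
        rw [pvTW_app _ hpre']; simp
      have hhead : ((a :: pre') ++ [] :: r).headD ['x'] = a := rfl
      have hlen : ((a :: pre') ++ [] :: r).length = pre'.length + 2 + r.length := by
        simp; omega
      have hrlen2 : 2 ≤ r.length := by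
        by_contra hlt
        push_neg at hlt
        have hpos : 0 < r.length := List.length_pos_iff.2 hr0
        have h1 : r.length = 1 := by omega
        obtain ⟨x, hx⟩ := List.length_eq_one_iff.1 h1
        subst hx
        simp at hr
        exact hne (by rw [hr])
      simp only [hnc, Bool.false_eq_true, if_false, hlast, htw, hhead, ha, hlen, false_and]
      have hlo : pre'.length + 2 + r.length - (pre'.length + 1) - 2 = r.length - 1 := by omega
      have hne0 : ¬ (r.length - 1 = 0) := by omega
      simp [ha, hlo, hne0]

-- ---- the IPv6 body ----
theorem bAfterGap_eq (gs : List (List Char)) (h0 : gs ≠ []) (h1 : gs ≠ [[]]) :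
    bAfterGap? gs = btail? gs := by
  cases gs with
  | nil => simp at h0
  | cons g t =>
    cases t with
    | nil =>
      cases g with
      | nil => simp at h1
      | cons c cs => rfl
    | cons t1 t2 => cases g <;> rfl

theorem all_hextet_eq (l : List (List Char)) : l.all pvHextetOk = l.all bHx := by
  induction l with
  | nil => rfl
  | cons x xs ih => simp [List.all_cons, ih, pvHextetOk_eq]

theorem all_hextet_false {l : List (List Char)} (h : [] ∈ l) : l.all pvHextetOk = false :=
  List.all_eq_false.2 ⟨[], h, by decide⟩

theorem pvSplitOn_mem_len {sep : Char} {l : List Char} (h : sep ∈ l) :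
    ∃ a b rest, pvSplitOn sep l = a :: b :: rest := by
  induction l with
  | nil => simp at h
  | cons c cs ih =>
    simp only [pvSplitOn]
    by_cases hc : c = sep
    · match hr : pvSplitOn sep cs with
      | [] => exact absurd hr (pvSplitOn_ne_nil sep cs)
      | h' :: t => exact ⟨[], h', t, by simp [hc]⟩
    · have hcs : sep ∈ cs := by
        rcases List.mem_cons.1 h with h1 | h1
        · exact absurd h1.symm hc
        · exact h1
      obtain ⟨a, b, rest, hab⟩ := ih hcs
      rw [hab]
      exact ⟨c :: a, b, rest, by simp [hc]⟩

theorem pvExpand_last_empty (xs : List (List Char)) :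
    pvExpand? (xs ++ [[]]) = some (xs ++ [[]]) := by
  have hlast : (xs ++ [[]]).getLastD [] = [] := by
    rw [List.getLastD_eq_getLast?, List.getLast?_concat]
    rfl
  simp [pvExpand?, hlast]

theorem pvIPv6BodyOk_eq (s : List Char) : pvIPv6BodyOk s = bParts6 (s.splitOn ':') := by
  rw [pvSplitOn_eq_splitOn]
  by_cases h0 : s = []
  · subst h0; rfl
  · rw [pvIPv6BodyOk]
    simp only [h0, if_false]
    generalize hp : pvSplitOn ':' s = parts0
    by_cases h3 : parts0.length < 3
    · simp only [bParts6]
      rw [if_pos h3, if_pos h3]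
    · simp only [bParts6]
      rw [if_neg h3, if_neg h3]
      have hne : parts0 ≠ [] := by intro he; rw [he] at h3; simp at h3
      obtain ⟨g, t, rfl⟩ := List.exists_cons_of_ne_nil hne
      have htne : t ≠ [] := by intro he; rw [he] at h3; simp at h3
      obtain ⟨g2, rest2, rfl⟩ := List.exists_cons_of_ne_nil htne
      have hr2ne : rest2 ≠ [] := by intro he; rw [he] at h3; simp at h3
      by_cases hg : g = []
      · subst hg
        by_cases hg2 : g2 = []
        · subst hg2
          simp only [List.isEmpty_nil, if_true]
          by_cases hr2 : rest2 = [[]]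
          · subst hr2
            rw [show ([] :: [] :: [[]] : List (List Char)) = [[], []] ++ [[]] from rfl,
              pvExpand_last_empty]
            decide
          · rw [bAfterGap_eq rest2 hr2ne hr2, btail_eq,
              show ([] :: [] :: rest2 : List (List Char)) = [[], []] ++ rest2 from rfl,
              pvExpand_append _ _ hr2ne]
            cases hE : pvExpand? rest2 with
            | none => rfl
            | some r' =>
              have hr'0 : r' ≠ [] := pvExpand_ne_nil hE hr2ne
              have hr'1 : r' ≠ [[]] := pvExpand_ne_single hE hr2
              simp only [Option.map_some]
              by_cases hmem : [] ∈ r'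
              · rw [show ([[], []] ++ r' : List (List Char)) = [] :: [] :: r' from rfl,
                  pvCheck_head_second r' hmem hr'1, all_hextet_false hmem]
                rfl
              · rw [show ([[], []] ++ r' : List (List Char)) = [] :: [] :: r' from rfl,
                  pvCheck_head r' hmem hr'0]
                cases hall : r'.all pvHextetOk <;> simp [hall]
        · simp only [List.isEmpty_nil, if_true,
            show g2.isEmpty = false by simpa [List.isEmpty_iff] using hg2, Bool.false_eq_true,
            if_false]
          rw [show ([] :: g2 :: rest2 : List (List Char)) = [[], g2] ++ rest2 from rfl,
            pvExpand_append _ _ hr2ne]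
          cases hE : pvExpand? rest2 with
          | none => rfl
          | some r2' =>
            simp only [Option.map_some]
            rw [show ([[], g2] ++ r2' : List (List Char)) = [] :: g2 :: r2' from rfl,
              pvCheck_head_bad g2 r2' hg2]
      · simp only [show g.isEmpty = false by simpa [List.isEmpty_iff] using hg,
          Bool.false_eq_true, if_false]
        have hP : (!g.isEmpty) = true := by simpa [List.isEmpty_iff] using hg
        have hsplit := List.takeWhile_append_dropWhile
          (p := fun p : List Char => !p.isEmpty) (l := g :: g2 :: rest2)
        have hpre : [] ∉ (g :: g2 :: rest2).takeWhile (fun p => !p.isEmpty) := by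
          intro hm
          have := List.mem_takeWhile_imp hm
          simp at this
        cases hsuf : (g :: g2 :: rest2).dropWhile (fun p => !p.isEmpty) with
        | nil =>
          have hnomem : [] ∉ (g :: g2 :: rest2 : List (List Char)) := by
            rw [← hsplit, hsuf, List.append_nil]
            exact hpre
          rw [bMain_no_gap _ 0 (by simp) hnomem, btail_eq]
          cases hE : pvExpand? (g :: g2 :: rest2) with
          | none => rfl
          | some p =>
            dsimp only
            rw [pvCheck_no_empty p (pvExpand_no_empty hE hnomem)]
            cases hall : p.all pvHextetOk <;> simp [hall] <;>
              cases h8 : decide (p.length = 8) <;> simp_all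
        | cons e suf' =>
          have he : e = [] := pvDW_first hsuf
          subst he
          have hdecomp : (g :: g2 :: rest2 : List (List Char))
              = (g :: g2 :: rest2).takeWhile (fun p => !p.isEmpty) ++ [] :: suf' := by
            rw [← hsuf, hsplit]
          have hpre0 : (g :: g2 :: rest2).takeWhile (fun p => !p.isEmpty) ≠ [] := by
            rw [List.takeWhile_cons, if_pos hP]
            simp
          rw [hdecomp, bMain_gap _ _ 0 hpre]
          cases hsuf' : suf' with
          | nil =>
            rw [show ((g :: g2 :: rest2).takeWhile (fun p => !p.isEmpty) ++ [] :: [] :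
                List (List Char))
              = (g :: g2 :: rest2).takeWhile (fun p => !p.isEmpty) ++ [[]] by rfl,
              pvExpand_last_empty]
            dsimp only
            rw [pvCheck_gap_end _ hpre]
            simp [bAfterGap?]
          | cons s1 s2 =>
            by_cases hs1 : suf' = [[]]
            · rw [← hsuf', hs1]
              rw [show ((g :: g2 :: rest2).takeWhile (fun p => !p.isEmpty) ++ [] :: [[]] :
                  List (List Char))
                = ((g :: g2 :: rest2).takeWhile (fun p => !p.isEmpty) ++ [[]]) ++ [[]] by simp,
                pvExpand_last_empty]
              dsimp only
              rw [show ((g :: g2 :: rest2).takeWhile (fun p => !p.isEmpty) ++ [[]] ++ [[]] :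
                  List (List Char))
                = (g :: g2 :: rest2).takeWhile (fun p => !p.isEmpty) ++ [[], []] by simp,
                pvCheck_trail _ hpre hpre0]
              rw [show bAfterGap? [[]] = some 0 from rfl, all_hextet_eq]
              cases hallb : ((g :: g2 :: rest2).takeWhile (fun p => !p.isEmpty)).all bHx <;>
                simp [hallb]
            · rw [← hsuf']
              have hs0 : suf' ≠ [] := by rw [hsuf']; simp
              rw [bAfterGap_eq suf' hs0 hs1, btail_eq,
                show ((g :: g2 :: rest2).takeWhile (fun p => !p.isEmpty) ++ [] :: suf' :
                    List (List Char))
                  = ((g :: g2 :: rest2).takeWhile (fun p => !p.isEmpty) ++ [[]]) ++ suf' by simp,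
                pvExpand_append _ _ hs0]
              cases hE : pvExpand? suf' with
              | none => simp
              | some r' =>
                have hr'0 : r' ≠ [] := pvExpand_ne_nil hE hs0
                have hr'1 : r' ≠ [[]] := pvExpand_ne_single hE hs1
                simp only [Option.map_some]
                rw [show (((g :: g2 :: rest2).takeWhile (fun p => !p.isEmpty) ++ [[]]) ++ r' :
                    List (List Char))
                  = (g :: g2 :: rest2).takeWhile (fun p => !p.isEmpty) ++ [] :: r' by simp]
                by_cases hmem : [] ∈ r'
                · rw [pvCheck_mid_second _ r' hpre hpre0 hmem hr'1, all_hextet_false hmem]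
                  simp
                · rw [pvCheck_mid _ r' hpre hpre0 hmem hr'0, all_hextet_eq r',
                    all_hextet_eq]
                  cases hall : r'.all bHx <;>
                    cases hallp : ((g :: g2 :: rest2).takeWhile (fun p => !p.isEmpty)).all bHx <;>
                      simp [hall, hallp, Nat.add_comm]

theorem pvDW_pct {l : List Char} {c : Char} {z : List Char}
    (h : l.dropWhile (· ≠ '%') = c :: z) : c = '%' := by
  induction l with
  | nil => simp at h
  | cons a t ih =>
    rw [List.dropWhile_cons] at h
    split at h
    · exact ih h
    · rename_i ha
      injection h with h1 h2
      rw [← h1]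
      simpa using ha

theorem pvIsIPv6_eq (s : List Char) : pvIsIPv6 s = bAccepts6 s := by
  by_cases hsl : s.contains '/' = true
  · rw [pvIsIPv6, bAccepts6, if_pos hsl, if_pos hsl]
  · rw [pvIsIPv6, bAccepts6, if_neg hsl, if_neg hsl]
    by_cases hpc : '%' ∈ s
    · cases hdw : s.dropWhile (· ≠ '%') with
      | nil =>
        exfalso
        have := List.dropWhile_eq_nil_iff.1 hdw '%' hpc
        simp at this
      | cons c z =>
        have hc : c = '%' := pvDW_pct hdw
        subst hc
        have hs_eq : s = s.takeWhile (· ≠ '%') ++ '%' :: z := by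
          conv_lhs => rw [← List.takeWhile_append_dropWhile (p := (· ≠ '%')) (l := s)]
          rw [hdw]
        have hnt : '%' ∉ s.takeWhile (· ≠ '%') := by
          intro hm
          have := List.mem_takeWhile_imp hm
          simp at this
        have hsp : pvSplitOn '%' s
            = s.takeWhile (· ≠ '%') :: pvSplitOn '%' z := by
          conv_lhs => rw [hs_eq]
          rw [pvSplitOn_append, pvSplitOn_of_not_mem _ _ hnt]
          rfl
        rw [pvSplitOn_eq_splitOn, hsp]
        dsimp only
        by_cases hzc : '%' ∈ z
        · obtain ⟨a, b, rest, hab⟩ := pvSplitOn_mem_len hzc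
          rw [hab]
          have : (z = [] ∨ z.contains '%' = true) := Or.inr (by simpa [List.contains_eq_mem])
          rw [if_pos this]
        · rw [pvSplitOn_of_not_mem _ _ hzc]
          by_cases hz0 : z = []
          · subst hz0
            simp
          · have hcond : ¬ (z = [] ∨ z.contains '%') := by
              simp [hz0, List.contains_eq_mem, hzc]
            rw [if_neg hcond]
            dsimp only
            have hzne : z.isEmpty = false := by simpa [List.isEmpty_iff] using hz0
            simp [hzne, pvIPv6BodyOk_eq]
    · have ht : s.takeWhile (· ≠ '%') = s :=
        List.takeWhile_eq_self_iff.2 (fun x hx => by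
          simp only [ne_eq, decide_eq_true_eq]
          exact fun he => hpc (he ▸ hx))
      have hd : s.dropWhile (· ≠ '%') = [] :=
        List.dropWhile_eq_nil_iff.2 (fun x hx => by
          simp only [ne_eq, decide_eq_true_eq]
          exact fun he => hpc (he ▸ hx))
      rw [ht, hd, pvSplitOn_eq_splitOn, pvSplitOn_of_not_mem _ _ hpc]
      dsimp only
      exact pvIPv6BodyOk_eq s

-- ---- disjointness and the fold ----
theorem bAccepts4_not_6 (s : List Char) (h : bAccepts4 s = true) : bAccepts6 s = false := by
  have hchars := bAccepts4_chars s h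
  have hnc : ∀ c : Char, c.isDigit = false → c ≠ '.' → c ∉ s := by
    intro c hcd hcdot hm
    rcases hchars c hm with h1 | h1
    · rw [h1] at hcd; simp at hcd
    · exact hcdot h1
  have hslash : s.contains '/' = false := by
    simp only [List.contains_eq_mem, decide_eq_false_iff_not]
    exact hnc '/' (by decide) (by decide)
  have hpct : '%' ∉ s := hnc '%' (by decide) (by decide)
  have hcolon : ':' ∉ s := hnc ':' (by decide) (by decide)
  rw [bAccepts6]
  simp only [hslash, Bool.false_eq_true, if_false]
  rw [pvSplitOn_eq_splitOn, pvSplitOn_of_not_mem _ _ hpct]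
  dsimp only
  rw [pvSplitOn_eq_splitOn, pvSplitOn_of_not_mem _ _ hcolon]
  simp [bParts6]

theorem pvFoldl_split (ips : List String) (acc : List String × List String) :
    ips.foldl pvStepA acc
      = (acc.1 ++ ips.filter (fun ip => bAccepts4 ip.toList),
         acc.2 ++ ips.filter (fun ip => bAccepts6 ip.toList)) := by
  induction ips generalizing acc with
  | nil => simp
  | cons ip rest ih =>
    simp only [List.foldl_cons, List.filter_cons]
    by_cases h4 : bAccepts4 ip.toList
    · have h6 : bAccepts6 ip.toList = false := bAccepts4_not_6 _ h4
      simp [pvStepA, pvIpVersion?, pvIsIPv4_eq, pvIsIPv6_eq, h4, h6, ih]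
    · by_cases h6 : bAccepts6 ip.toList
      · simp [pvStepA, pvIpVersion?, pvIsIPv4_eq, pvIsIPv6_eq, h4, h6, ih]
      · simp [pvStepA, pvIpVersion?, pvIsIPv4_eq, pvIsIPv6_eq, h4, h6, ih]

-- ===== VERDICT (by name: the statement is the Claim_ definition above) =====
theorem split_v4_v6_spec : Claim_equal_split_v4_v6 := by
  intro ips _
  show split_v4_v6 ips = split_v4_v6_alt ips
  simp [split_v4_v6, split_v4_v6_alt, pvFoldl_split]
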